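-- pv_equiv track=rewrite | github.com/amanabiy/competitive_programming | 2121-intervals-between-identical-elements/2121-intervals-between-identical-elements.py | getForwardSum
-- ===== SOURCE A (Python) =====
-- def getForwardSum(arr):
--     value = {}
--     ans = [0] * len(arr)
--
--
--     for ind, val in enumerate(arr):
--         if val not in value:
--             value[val] = [0, 0, ind]
--             continue
--         lastSum, lastCount, lastInd = value[val]
--         lastCount += 1
--         currSum = ((ind - lastInd) * lastCount) + lastSum
--         value[val] = [currSum, lastCount, ind]
--         ans[ind] = currSum
--
--     return ans
-- ===== SOURCE B (Python) =====
-- def getForwardSum(arr):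
--     groups = {}
--     for ind, val in enumerate(arr):
--         groups.setdefault(val, []).append(ind)
--     ans = [0] * len(arr)
--     for idxs in groups.values():
--         k = 0
--         s = 0
--         for p in idxs:
--             ans[p] = k * p - s
--             s += p
--             k += 1
--     return ans
-- ===== Notes on version B (the rewrite author's own statement) =====
-- stated objective: alternative
-- what changed: Replaced A's single flat pass carrying a per-value running (distance-sum, count, last-index) triple by a two-pass group-then-scan decomposition: first group the indices of each value into a dict of index lists, then for each group keep only an occurrence count k and index-sum S and emit k*p - S at position p.
import Mathlib
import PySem

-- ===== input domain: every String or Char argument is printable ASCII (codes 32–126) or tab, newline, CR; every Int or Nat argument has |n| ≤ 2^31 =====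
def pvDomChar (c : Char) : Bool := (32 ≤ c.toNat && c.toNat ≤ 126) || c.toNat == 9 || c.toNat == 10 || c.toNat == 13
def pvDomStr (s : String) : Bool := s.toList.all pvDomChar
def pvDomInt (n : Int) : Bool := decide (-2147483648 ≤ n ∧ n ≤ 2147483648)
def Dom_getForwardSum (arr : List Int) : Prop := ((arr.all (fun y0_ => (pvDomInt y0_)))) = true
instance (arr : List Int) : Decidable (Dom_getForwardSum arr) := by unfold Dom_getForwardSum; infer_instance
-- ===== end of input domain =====

-- B replaces A's single flat pass (per-value running distance-sum/count/last-index triple)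
-- by a two-pass group-the-indices-then-scan-each-group decomposition; alternative algorithm of the same cost.


-- ===== PORT A =====
def gfsStepA (st : PySem.Dict Int (Int × Int × Int) × List Int) (p : Int × Int) :
    PySem.Dict Int (Int × Int × Int) × List Int :=
  match st.1.get? p.2 with
  | none => (st.1.insert p.2 (0, 0, p.1), st.2)
  | some (lastSum, lastCount, lastInd) =>
    let lastCount := lastCount + 1
    let currSum := (p.1 - lastInd) * lastCount + lastSum
    (st.1.insert p.2 (currSum, lastCount, p.1), PySem.List.pySetD st.2 p.1 currSum)

def getForwardSum (arr : List Int) : List Int :=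
  ((PySem.List.enumerate arr).foldl gfsStepA
    (PySem.Dict.empty, List.replicate arr.length 0)).2

-- ===== PORT B =====
def gfsInnerB (idxs : List Int) (ans : List Int) (k s : Int) : List Int :=
  (idxs.foldl (fun (st : List Int × Int × Int) p =>
      (PySem.List.pySetD st.1 p (st.2.1 * p - st.2.2), st.2.1 + 1, st.2.2 + p))
    (ans, k, s)).1

def getForwardSum_alt (arr : List Int) : List Int :=
  let groups : PySem.Dict Int (List Int) :=
    (PySem.List.enumerate arr).foldl
      (fun d p => d.modify p.2 [] (fun l => l ++ [p.1])) PySem.Dict.empty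
  let ans := List.replicate arr.length 0
  groups.values.foldl (fun a idxs => gfsInnerB idxs a 0 0) ans

-- ===== PRECONDITION & SPEC =====
def Spec_getForwardSum (arr : List Int) (out : List Int) : Prop := out = getForwardSum_alt arr
instance (arr : List Int) (out : List Int) : Decidable (Spec_getForwardSum arr out) := by unfold Spec_getForwardSum; infer_instance

-- ===== CLAIM (what is proved, stated in full; the proofs are below) =====
def Claim_equal_getForwardSum : Prop := ∀ (arr : List Int), Dom_getForwardSum arr → Spec_getForwardSum arr (getForwardSum arr)

-- ===== LEMMAS AND PROOFS =====
theorem gfsInnerB_cons (p : Int) (rest : List Int) (ans : List Int) (k s : Int) :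
    gfsInnerB (p :: rest) ans k s
      = gfsInnerB rest (PySem.List.pySetD ans p (k * p - s)) (k + 1) (s + p) := rfl

theorem gfsInnerB_length (idxs ans : List Int) (k s : Int) :
    (gfsInnerB idxs ans k s).length = ans.length := by
  induction idxs generalizing ans k s with
  | nil => rfl
  | cons p rest ih => rw [gfsInnerB_cons, ih, PySem.List.length_pySetD]

theorem gfsInnerB_getD (ps : List Nat) (ans : List Int) (k s : Int) (i : Nat)
    (hnd : ps.Nodup) (hlen : ∀ p ∈ ps, p < ans.length) :
    PySem.List.pyGetD (gfsInnerB (ps.map (fun (j : Nat) => (j : Int))) ans k s) (i : Int) 0 =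
      if i ∈ ps then
        (k + (ps.idxOf i : Int)) * i - (s + ((ps.take (ps.idxOf i)).map (fun (j : Nat) => (j : Int))).sum)
      else PySem.List.pyGetD ans (i : Int) 0 := by
  induction ps generalizing ans k s with
  | nil => simp [gfsInnerB]
  | cons p rest ih =>
    rw [List.map_cons, gfsInnerB_cons]
    have hplen : p < ans.length := hlen p (List.mem_cons_self ..)
    rw [ih (PySem.List.pySetD ans p (k * p - s)) (k+1) (s+p) hnd.of_cons
        (by intro q hq; rw [PySem.List.length_pySetD]; exact hlen q (List.mem_cons_of_mem _ hq))]
    by_cases hip : i = p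
    · subst hip
      have : i ∉ rest := (List.nodup_cons.mp hnd).1
      simp [this, List.idxOf_cons_self, List.getElem?_set, hplen]
    · by_cases hir : i ∈ rest
      · have hidx : (p :: rest).idxOf i = rest.idxOf i + 1 := by
          simp [List.idxOf_cons, hip, Ne.symm hip]
        simp only [hir, if_true, List.mem_cons, hip, false_or, hidx, List.take_succ_cons,
          List.map_cons, List.sum_cons]
        push_cast
        ring_nf
      · simp [hir, hip, List.getElem?_set, Ne.symm hip]

def gfsOcc (xs : List Int) (v : Int) : List Nat :=
  (List.range xs.length).filter (fun j => xs.getD j 0 == v)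

def gfsRef (xs : List Int) (i : Nat) : Int :=
  let prior := (List.range i).filter (fun j => xs.getD j 0 == xs.getD i 0)
  (prior.length : Int) * i - (prior.map (fun (j : Nat) => (j : Int))).sum

def gfsVec (xs : List Int) (n : Nat) : List Int :=
  (List.range n).map (fun i => if i < xs.length then gfsRef xs i else 0)

theorem gfsOcc_nodup (xs : List Int) (v : Int) : (gfsOcc xs v).Nodup :=
  (List.nodup_range).filter _

theorem gfsOcc_lt (xs : List Int) (v : Int) : ∀ p ∈ gfsOcc xs v, p < xs.length := by
  intro p hp
  have := (List.mem_filter.mp hp).2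
  have := List.mem_of_mem_filter hp
  simpa [List.mem_range] using List.mem_of_mem_filter hp

-- decomposition of the occurrence list at a member i

theorem gfsOcc_split (xs : List Int) (v : Int) (i : Nat) (hi : i ∈ gfsOcc xs v) :
    (List.range i).filter (fun j => xs.getD j 0 == v) =
      (gfsOcc xs v).take ((gfsOcc xs v).idxOf i) ∧
    (gfsOcc xs v).idxOf i = ((List.range i).filter (fun j => xs.getD j 0 == v)).length := by
  have hin : i < xs.length := gfsOcc_lt xs v i hi
  have hPi : (fun j => xs.getD j 0 == v) i = true := by
    have h := hi; unfold gfsOcc at h; exact (List.mem_filter.mp h).2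
  set P : Nat → Bool := fun j => xs.getD j 0 == v with hP
  have h1 : List.range xs.length = List.range i ++ List.range' i (xs.length - i) := by
    rw [List.range_eq_range', List.range_eq_range']
    have h := @List.range'_append 0 i (xs.length - i) 1
    simp only [Nat.zero_add, Nat.one_mul] at h
    conv_lhs => rw [show xs.length = i + (xs.length - i) from by omega]
    exact h.symm
  have h2 : List.range' i (xs.length - i) = i :: List.range' (i+1) (xs.length - (i+1)) := by
    have : xs.length - i = (xs.length - (i+1)) + 1 := by omega
    rw [this, List.range'_succ]
  have hsplit : gfsOcc xs v =
      (List.range i).filter P ++ i :: ((List.range' (i+1) (xs.length - (i+1))).filter P) := by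
    unfold gfsOcc
    rw [h1, h2, List.filter_append, List.filter_cons, if_pos hPi]
  have hnotmem : i ∉ (List.range i).filter P := by
    intro h
    have := List.mem_of_mem_filter h
    simp [List.mem_range] at this
  constructor
  · rw [hsplit, List.idxOf_append, if_neg hnotmem, List.idxOf_cons_self]
    simp [List.take_left']
  · rw [hsplit, List.idxOf_append, if_neg hnotmem, List.idxOf_cons_self]
    omega

theorem gfsOcc_mem_iff (xs : List Int) (v : Int) (i : Nat) :
    i ∈ gfsOcc xs v ↔ i < xs.length ∧ xs.getD i 0 = v := by
  unfold gfsOcc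
  simp [List.mem_filter, List.mem_range]

theorem gfsInner_value (xs : List Int) (v : Int) (i : Nat) (hi : i ∈ gfsOcc xs v) :
    (0 + ((gfsOcc xs v).idxOf i : Int)) * i -
      (0 + (((gfsOcc xs v).take ((gfsOcc xs v).idxOf i)).map (fun (j : Nat) => (j : Int))).sum)
    = gfsRef xs i := by
  obtain ⟨h1, h2⟩ := gfsOcc_split xs v i hi
  have hv : xs.getD i 0 = v := ((gfsOcc_mem_iff xs v i).mp hi).2
  unfold gfsRef
  rw [← h1, h2, hv]
  push_cast
  ring

-- the outer fold of B, pointwise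

theorem gfsOuter_getD (xs : List Int) (vs : List Int) (ans : List Int)
    (hlen : ans.length = xs.length) (i : Nat) :
    PySem.List.pyGetD
      (vs.foldl (fun a v => gfsInnerB ((gfsOcc xs v).map (fun (j : Nat) => (j : Int))) a 0 0) ans)
      (i : Int) 0 =
    if i < xs.length ∧ xs.getD i 0 ∈ vs then gfsRef xs i else PySem.List.pyGetD ans (i : Int) 0 := by
  induction vs generalizing ans with
  | nil => simp
  | cons v vs' ih =>
    simp only [List.foldl_cons]
    rw [ih _ (by rw [gfsInnerB_length]; exact hlen)]
    rw [gfsInnerB_getD _ _ _ _ _ (gfsOcc_nodup xs v)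
      (by intro p hp; rw [hlen]; exact gfsOcc_lt xs v p hp)]
    by_cases hin : i < xs.length ∧ xs.getD i 0 = v
    · have hocc : i ∈ gfsOcc xs v := (gfsOcc_mem_iff xs v i).mpr hin
      rw [if_pos hocc, gfsInner_value xs v i hocc]
      have hvv : xs[i] = v := by rw [← List.getD_eq_getElem xs 0 hin.1]; exact hin.2
      simp [hin.1, hvv]
    · have hocc : i ∉ gfsOcc xs v := fun h => hin ((gfsOcc_mem_iff xs v i).mp h)
      rw [if_neg hocc]
      by_cases h1 : i < xs.length
      · simp only [List.mem_cons]
        have hvv : xs[i] ≠ v := by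
          rw [← List.getD_eq_getElem xs 0 h1]; exact fun h => hin ⟨h1, h⟩
        simp [h1, hvv, List.getD_eq_getElem xs 0 h1]
      · simp [h1]

theorem gfsGroups_getD (arr : List Int) (v : Int) :
    ((PySem.List.enumerate arr).foldl (fun d p => d.modify p.2 [] (fun l => l ++ [p.1]))
        PySem.Dict.empty).getD v []
      = (gfsOcc arr v).map (fun (j : Nat) => (j : Int)) := by
  have hswap : (PySem.List.enumerate arr).foldl
        (fun d p => d.modify p.2 [] (fun l => l ++ [p.1])) PySem.Dict.empty
      = ((PySem.List.enumerate arr).map Prod.swap).foldl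
        (fun d p => d.modify p.1 [] (fun l => l ++ [p.2])) PySem.Dict.empty := by
    rw [List.foldl_map]; rfl
  rw [hswap, PySem.Dict.getD_foldl_modify_append]
  rw [PySem.List.enumerate_eq_map_pyRange arr 0]
  simp only [PySem.List.len_eq, PySem.List.pyRange_zero_nat]
  simp only [List.map_map, List.filter_map, List.map_map, Function.comp_def, Prod.swap]
  unfold gfsOcc
  simp

theorem gfsGroups_values (arr : List Int) :
    ((PySem.List.enumerate arr).foldl (fun d p => d.modify p.2 [] (fun l => l ++ [p.1]))
        PySem.Dict.empty).values
      = (PySem.Set.ofList arr).map (fun v => (gfsOcc arr v).map (fun (j : Nat) => (j : Int))) := by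
  have hnd : ((PySem.List.enumerate arr).foldl
      (fun d p => d.modify p.2 [] (fun l => l ++ [p.1])) PySem.Dict.empty).keys.Nodup := by
    exact PySem.Dict.nodup_keys_foldl_modify_key (PySem.List.enumerate arr)
      (fun (p : Int × Int) => p.2) [] (fun _ (p : Int × Int) (l : List Int) => l ++ [p.1]) _
      PySem.Dict.nodup_keys_empty
  have hkeys : ((PySem.List.enumerate arr).foldl
      (fun d p => d.modify p.2 [] (fun l => l ++ [p.1])) PySem.Dict.empty).keys
      = PySem.Set.ofList arr := by
    rw [PySem.Dict.keys_foldl_modify_key (PySem.List.enumerate arr)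
      (fun (p : Int × Int) => p.2) [] (fun _ (p : Int × Int) (l : List Int) => l ++ [p.1])]
    simp [PySem.List.map_snd_enumerate, PySem.Set.ofList_eq_foldl, PySem.Set.update,
      PySem.Dict.keys_empty]
  rw [PySem.Dict.values_eq_map_keys _ hnd [], hkeys]
  exact List.map_congr_left (fun v _ => gfsGroups_getD arr v)

theorem gfsOuter_length' (xs : List Int) (vs : List Int) (ans : List Int) :
    ((vs.foldl (fun a v => gfsInnerB ((gfsOcc xs v).map (fun (j : Nat) => (j : Int))) a 0 0) ans)).length
      = ans.length := by
  induction vs generalizing ans with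
  | nil => rfl
  | cons v t ih => simp [List.foldl_cons, ih, gfsInnerB_length]

theorem gfsB_eq : ∀ (arr : List Int), getForwardSum_alt arr = gfsVec arr arr.length := by
  intro arr
  unfold getForwardSum_alt
  simp only
  rw [gfsGroups_values, List.foldl_map]
  have hlen1 := gfsOuter_length' arr (PySem.Set.ofList arr) (List.replicate arr.length 0)
  rw [List.length_replicate] at hlen1
  apply List.ext_getElem
  · rw [hlen1]; unfold gfsVec; simp
  · intro i hi hi2
    have hiarr : i < arr.length := by rwa [hlen1] at hi
    have hout := gfsOuter_getD arr (PySem.Set.ofList arr) (List.replicate arr.length 0)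
      (by simp) i
    have hmem : arr.getD i 0 ∈ PySem.Set.ofList arr := by
      rw [PySem.Set.mem_ofList, List.getD_eq_getElem arr 0 hiarr]
      exact List.getElem_mem hiarr
    rw [if_pos ⟨hiarr, hmem⟩] at hout
    have hlhs : (List.foldl (fun a v => gfsInnerB ((gfsOcc arr v).map (fun (j : Nat) => (j : Int))) a 0 0)
        (List.replicate arr.length 0) (PySem.Set.ofList arr))[i] = gfsRef arr i := by
      have := hout
      rw [PySem.List.pyGetD_natCast] at this
      rw [← this, List.getD_eq_getElem _ _ hi]
    rw [hlhs]
    unfold gfsVec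
    simp [hiarr]

-- ===== A side =====

def gfsEntry (xs : List Int) (v : Int) : Option (Int × Int × Int) :=
  match (gfsOcc xs v).reverse with
  | [] => none
  | L :: qs => some ((qs.length : Int) * (L : Int) - (qs.map (fun (j : Nat) => (j : Int))).sum,
      (qs.length : Int), (L : Int))

theorem gfsGetD_append_len (xs : List Int) (x : Int) : (xs ++ [x]).getD xs.length 0 = x := by
  rw [List.getD_eq_getElem _ _ (by simp)]
  simp

theorem gfsOcc_append (xs : List Int) (x v : Int) :
    gfsOcc (xs ++ [x]) v = gfsOcc xs v ++ (if x = v then [xs.length] else []) := by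
  unfold gfsOcc
  rw [List.length_append, List.length_singleton, List.range_succ, List.filter_append]
  congr 1
  · apply List.filter_congr
    intro j hj
    rw [List.getD_append xs [x] 0 j (List.mem_range.mp hj)]
  · simp only [List.filter_cons, List.filter_nil, gfsGetD_append_len]
    by_cases h : x = v <;> simp [h]

theorem gfsRef_append (xs : List Int) (x : Int) (i : Nat) (h : i < xs.length) :
    gfsRef (xs ++ [x]) i = gfsRef xs i := by
  unfold gfsRef
  have hgi : (xs ++ [x]).getD i 0 = xs.getD i 0 := List.getD_append xs [x] 0 i h
  have : (List.range i).filter (fun j => (xs ++ [x]).getD j 0 == (xs ++ [x]).getD i 0)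
      = (List.range i).filter (fun j => xs.getD j 0 == xs.getD i 0) := by
    apply List.filter_congr
    intro j hj
    rw [hgi, List.getD_append xs [x] 0 j (lt_trans (List.mem_range.mp hj) h)]
  rw [this]

-- value written at the newly appended position

theorem gfsRef_append_last (xs : List Int) (x : Int) :
    gfsRef (xs ++ [x]) xs.length =
      ((gfsOcc xs x).length : Int) * xs.length -
        ((gfsOcc xs x).map (fun (j : Nat) => (j : Int))).sum := by
  unfold gfsRef gfsOcc
  have : (List.range xs.length).filter (fun j => (xs ++ [x]).getD j 0 == (xs ++ [x]).getD xs.length 0)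
      = (List.range xs.length).filter (fun j => xs.getD j 0 == x) := by
    apply List.filter_congr
    intro j hj
    rw [gfsGetD_append_len, List.getD_append xs [x] 0 j (List.mem_range.mp hj)]
  rw [this]

theorem gfsVec_append (xs : List Int) (x : Int) (n : Nat) (hn : xs.length < n) :
    gfsVec (xs ++ [x]) n = (gfsVec xs n).set xs.length (gfsRef (xs ++ [x]) xs.length) := by
  apply List.ext_getElem
  · unfold gfsVec; simp
  · intro i hi1 hi2
    unfold gfsVec at *
    simp only [List.length_map, List.length_range] at hi1
    rw [List.getElem_map, List.getElem_set, List.getElem_map]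
    simp only [List.getElem_range, List.length_append, List.length_singleton]
    by_cases hil : i = xs.length
    · subst hil
      simp
    · have hil' : xs.length ≠ i := fun h => hil h.symm
      by_cases hlt : i < xs.length
      · simp [hil', hlt, Nat.lt_succ_of_lt hlt, gfsRef_append xs x i hlt]
      · have : ¬ i < xs.length + 1 := by omega
        simp [hil', hlt, this]

theorem gfsVec_append_nil (xs : List Int) (x : Int) (n : Nat) (hn : xs.length < n)
    -- (hn kept for the call to gfsVec_append)
    (hocc : gfsOcc xs x = []) :
    gfsVec (xs ++ [x]) n = gfsVec xs n := by
  rw [gfsVec_append xs x n hn, gfsRef_append_last, hocc]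
  simp only [List.length_nil, List.map_nil, List.sum_nil, Nat.cast_zero, zero_mul, sub_zero]
  apply List.ext_getElem
  · simp
  · intro i hi1 hi2
    rw [List.getElem_set]
    by_cases hil : xs.length = i
    · subst hil
      unfold gfsVec
      rw [List.getElem_map]
      simp
    · simp [hil]

theorem gfsA_inv (xs : List Int) (n : Nat) (hn : xs.length ≤ n) :
    ∃ d, (PySem.List.enumerate xs).foldl gfsStepA (PySem.Dict.empty, List.replicate n 0)
        = (d, gfsVec xs n)
      ∧ ∀ v, d.get? v = gfsEntry xs v := by
  induction xs using List.reverseRecOn with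
  | nil =>
    refine ⟨PySem.Dict.empty, ?_, ?_⟩
    · unfold gfsVec
      simp [PySem.List.enumerate_nil, List.map_const']
    · intro v
      simp [gfsEntry, gfsOcc, PySem.Dict.get?_empty]
  | append_singleton xs x ih =>
    obtain ⟨d, hf, hg⟩ := ih (by simp at hn; omega)
    have hlen : xs.length < n := by simp at hn; omega
    rw [PySem.List.enumerate_append, List.foldl_append, hf]
    simp only [PySem.List.enumerate_cons, PySem.List.enumerate_nil, List.foldl_cons, List.foldl_nil]
    have hstep : gfsStepA (d, gfsVec xs n) ((0 : Int) + (xs.length : Int), x)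
        = gfsStepA (d, gfsVec xs n) ((xs.length : Int), x) := by norm_num
    rw [hstep]
    unfold gfsStepA
    simp only
    rw [hg x]
    cases hocc : (gfsOcc xs x).reverse with
    | nil =>
      have hocc' : gfsOcc xs x = [] := List.reverse_eq_nil_iff.mp hocc
      unfold gfsEntry
      rw [hocc]
      refine ⟨d.insert x (0, 0, (xs.length : Int)), ?_, ?_⟩
      · simp [gfsVec_append_nil xs x n hlen hocc']
      · intro v
        by_cases hvx : v = x
        · subst hvx
          rw [PySem.Dict.get?_insert_self, gfsOcc_append, if_pos rfl, hocc']
          simp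
        · rw [PySem.Dict.get?_insert_of_ne _ _ hvx, gfsOcc_append,
            if_neg (fun h => hvx h.symm), List.append_nil, hg v]
          rfl
    | cons L qs =>
      have hocc' : gfsOcc xs x = qs.reverse ++ [L] := by
        rw [← List.reverse_reverse (gfsOcc xs x), hocc]; simp
      unfold gfsEntry
      rw [hocc]
      set C : Int := (qs.length : Int) with hC
      set S : Int := (qs.map (fun (j : Nat) => (j : Int))).sum with hS
      set S' : Int := ((xs.length : Int) - (L : Int)) * (C + 1) + (C * (L : Int) - S) with hS'
      refine ⟨d.insert x (S', C + 1, (xs.length : Int)), ?_, ?_⟩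
      · have hans : PySem.List.pySetD (gfsVec xs n) ((xs.length : Nat) : Int) S'
            = gfsVec (xs ++ [x]) n := by
          rw [PySem.List.pySetD_natCast, gfsVec_append xs x n hlen, gfsRef_append_last, hocc']
          congr 1
          simp only [List.length_append, List.length_singleton, List.length_reverse,
            List.map_append, List.map_reverse, List.sum_append, List.sum_reverse,
            List.map_cons, List.sum_cons, List.map_nil, List.sum_nil]
          push_cast
          ring
        simp only [Prod.mk.injEq]
        exact ⟨rfl, by rw [← hans]⟩
      · intro v
        by_cases hvx : v = x
        · subst hvx
          rw [PySem.Dict.get?_insert_self, gfsOcc_append, if_pos rfl, hocc']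
          simp only [List.reverse_append, List.reverse_cons, List.reverse_reverse,
            List.reverse_nil, List.nil_append, List.cons_append]
          simp only [Option.some.injEq, Prod.mk.injEq, List.length_cons, List.map_cons,
            List.sum_cons]
          refine ⟨?_, ?_, ?_⟩ <;> push_cast [hC, hS, hS'] <;> ring
        · rw [PySem.Dict.get?_insert_of_ne _ _ hvx, gfsOcc_append,
            if_neg (fun h => hvx h.symm), List.append_nil, hg v]
          rfl

theorem gfsA_eq : ∀ (arr : List Int), getForwardSum arr = gfsVec arr arr.length := by
  intro arr
  obtain ⟨d, hf, -⟩ := gfsA_inv arr arr.length le_rfl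
  unfold getForwardSum
  rw [hf]

-- ===== VERDICT (by name: the statement is the Claim_ definition above) =====
theorem getForwardSum_spec : Claim_equal_getForwardSum := by
  intro arr _
  unfold Spec_getForwardSum
  rw [gfsA_eq, gfsB_eq]
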